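-- pv_equiv track=rewrite | github.com/VarshaP-0405/Sem2_Python-coding | TECH_HOMEWORK_29-01-25.py | longest_good_subarray
-- ===== SOURCE A (Python) =====
-- def longest_good_subarray(nums):
--     prefix_sum = 0
--     index_map = {0: -1}
--     max_length = 0
--
--     for i, num in enumerate(nums):
--         prefix_sum += 1 if num == 1 else -1
--
--         if prefix_sum in index_map:
--             max_length = max(max_length, i - index_map[prefix_sum])
--         else:
--             index_map[prefix_sum] = i
--
--     return max_length
-- ===== SOURCE B (Python) =====
-- def longest_good_subarray(nums):
--     n = len(nums)
--     max_length = 0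
--     for i in range(n):
--         balance = 0
--         for j in range(i, n):
--             balance += 1 if nums[j] == 1 else -1
--             if balance == 0:
--                 max_length = max(max_length, j - i + 1)
--     return max_length
-- ===== Notes on version B (the rewrite author's own statement) =====
-- stated objective: simpler
-- what changed: Replaced the prefix-sum hashmap single pass with a plain double loop: for each start index walk right keeping a running balance and record the length whenever the balance hits zero.
import Mathlib
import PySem

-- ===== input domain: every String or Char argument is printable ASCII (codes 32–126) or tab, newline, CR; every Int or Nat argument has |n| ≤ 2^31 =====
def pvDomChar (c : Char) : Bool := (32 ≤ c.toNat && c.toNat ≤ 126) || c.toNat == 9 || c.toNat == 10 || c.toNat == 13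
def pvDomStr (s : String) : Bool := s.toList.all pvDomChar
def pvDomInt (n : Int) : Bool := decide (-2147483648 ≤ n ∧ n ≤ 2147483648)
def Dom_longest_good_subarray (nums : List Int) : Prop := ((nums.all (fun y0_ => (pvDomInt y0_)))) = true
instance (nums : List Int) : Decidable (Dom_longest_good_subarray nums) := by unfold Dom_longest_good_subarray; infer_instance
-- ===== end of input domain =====

-- B replaces A's prefix-sum hashmap single pass by a plain double loop (running balance per start index); objective: simpler.

-- ===== PORT A =====
-- literal port of A: prefix_sum / index_map / max_length fold over enumerate(nums);
-- 'prefix_sum in index_map' + 'index_map[prefix_sum]' is the match on get?.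
def longest_good_subarray (nums : List Int) : Int :=
  (((PySem.List.enumerate nums).foldl
    (fun (st : Int × PySem.Dict Int Int × Int) (p : Int × Int) =>
      let prefix_sum := st.1 + (if p.2 = 1 then 1 else -1)
      match (st.2.1).get? prefix_sum with
      | some v => (prefix_sum, st.2.1, max st.2.2 (p.1 - v))
      | none   => (prefix_sum, (st.2.1).insert prefix_sum p.1, st.2.2))
    (0, (PySem.Dict.empty).insert 0 (-1), 0)).2.2)

-- ===== PORT B =====
-- literal port of Source B: for i in range(n): balance = 0; for j in range(i, n): …
-- nums[j] (always in range here) is PySem.List.pyGetD.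
def longest_good_subarray_alt (nums : List Int) : Int :=
  let n : Int := nums.length
  (PySem.List.pyRange 0 n).foldl
    (fun max_length i =>
      ((PySem.List.pyRange i n).foldl
        (fun (st : Int × Int) j =>
          let balance := st.1 + (if PySem.List.pyGetD nums j 0 = 1 then 1 else -1)
          (balance, if balance = 0 then max st.2 (j - i + 1) else st.2))
        (0, max_length)).2)
    0

-- ===== PRECONDITION & SPEC =====
def Spec_longest_good_subarray (nums : List Int) (out : Int) : Prop := out = longest_good_subarray_alt nums
instance (nums : List Int) (out : Int) : Decidable (Spec_longest_good_subarray nums out) := by unfold Spec_longest_good_subarray; infer_instance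

-- ===== CLAIM (what is proved, stated in full; the proofs are below) =====
def Claim_equal_longest_good_subarray : Prop := ∀ (nums : List Int), Dom_longest_good_subarray nums → Spec_longest_good_subarray nums (longest_good_subarray nums)

-- ===== LEMMAS AND PROOFS =====

-- the ±1 weight of one element
def pvf (x : Int) : Int := if x = 1 then 1 else -1

-- prefix sum of the first k weights
def pvPre (xs : List Int) (k : Nat) : Int := ((xs.take k).map pvf).sum

-- first index with the same prefix sum as index j
def pvFi (xs : List Int) (j : Nat) : Nat :=
  Nat.find (p := fun k => pvPre xs k = pvPre xs j) ⟨j, rfl⟩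

-- running max of (j - first occurrence of prefix j), j = 0 .. m   (A's max_length after m steps)
def pvS (xs : List Int) (m : Nat) : Int :=
  (List.range (m+1)).foldl (fun (acc : Int) (j : Nat) => max acc ((j : Int) - (pvFi xs j : Int))) 0

-- the dict invariant: index_map maps v to (first k with pvPre k = v) - 1
def pvFirst (xs : List Int) (v x : Int) : Prop :=
  ∃ k : Nat, k ≤ xs.length ∧ pvPre xs k = v ∧ x = (k : Int) - 1 ∧ ∀ k' < k, pvPre xs k' ≠ v

-- B's inner loop, characterised over natural indices
def pvInner (xs : List Int) (a j m : Nat) (ml : Int) : Int :=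
  (List.range' j (m - j)).foldl
    (fun (acc : Int) (k : Nat) => if pvPre xs (k+1) = pvPre xs a then max acc ((k : Int) - (a : Int) + 1) else acc) ml

-- B's whole computation, characterised
def pvB (xs : List Int) : Int :=
  (List.range xs.length).foldl (fun ml a => pvInner xs a a xs.length ml) 0

lemma pvPre_append_le (xs : List Int) (x : Int) {k : Nat} (h : k ≤ xs.length) :
    pvPre (xs ++ [x]) k = pvPre xs k := by
  simp [pvPre, List.take_append, Nat.sub_eq_zero_of_le h]

lemma pvPre_append_last (xs : List Int) (x : Int) :
    pvPre (xs ++ [x]) (xs.length + 1) = pvPre xs xs.length + pvf x := by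
  have h1 : (xs ++ [x]).take (xs.length + 1) = xs ++ [x] := List.take_of_length_le (by simp)
  simp [pvPre, h1]

lemma pvPre_succ (xs : List Int) {j : Nat} (h : j < xs.length) :
    pvPre xs (j+1) = pvPre xs j + pvf xs[j] := by
  unfold pvPre
  rw [List.take_add_one, List.getElem?_eq_getElem h]
  rw [List.map_append, List.sum_append]
  simp

lemma pvFi_le (xs : List Int) (j : Nat) : pvFi xs j ≤ j := by unfold pvFi; exact Nat.find_min' (p := fun k => pvPre xs k = pvPre xs j) _ rfl

lemma pvFi_spec (xs : List Int) (j : Nat) : pvPre xs (pvFi xs j) = pvPre xs j := by unfold pvFi; exact Nat.find_spec (p := fun k => pvPre xs k = pvPre xs j) _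

lemma pvFi_min (xs : List Int) (j : Nat) {k : Nat} (h : k < pvFi xs j) : pvPre xs k ≠ pvPre xs j := by unfold pvFi at h; exact Nat.find_min (p := fun k => pvPre xs k = pvPre xs j) _ h

lemma pvFi_eq_of (xs : List Int) (j m : Nat) (hm : pvPre xs m = pvPre xs j)
    (hmin : ∀ k < m, pvPre xs k ≠ pvPre xs j) : pvFi xs j = m := by
  refine le_antisymm ?_ ?_
  · unfold pvFi; exact Nat.find_min' _ hm
  · by_contra hlt
    exact hmin _ (by omega) (pvFi_spec xs j)

lemma pvFi_append (xs : List Int) (x : Int) {j : Nat} (h : j ≤ xs.length) :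
    pvFi (xs ++ [x]) j = pvFi xs j := by
  apply pvFi_eq_of
  · rw [pvPre_append_le xs x (le_trans (pvFi_le xs j) h), pvPre_append_le xs x h]
    exact pvFi_spec xs j
  · intro k hk
    rw [pvPre_append_le xs x (by have := pvFi_le xs j; omega), pvPre_append_le xs x h]
    exact pvFi_min xs j hk

lemma pvS_append (xs : List Int) (x : Int) {m : Nat} (h : m ≤ xs.length) :
    pvS (xs ++ [x]) m = pvS xs m := by
  unfold pvS
  apply PySem.List.foldl_congr_mem
  intro acc j hj
  rw [pvFi_append xs x (le_trans (by exact Nat.lt_succ_iff.mp (List.mem_range.mp hj)) h)]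

lemma pvS_succ (xs : List Int) (m : Nat) :
    pvS xs (m+1) = max (pvS xs m) ((m : Int) + 1 - (pvFi xs (m+1) : Int)) := by
  unfold pvS
  rw [List.range_succ, List.foldl_append]
  rfl

lemma pvS_nonneg (xs : List Int) (m : Nat) : 0 ≤ pvS xs m :=
  (PySem.List.le_foldl_max_int _ _ _).1

lemma pvS_bound (xs : List Int) {j m : Nat} (h : j ≤ m) :
    (j : Int) - (pvFi xs j : Int) ≤ pvS xs m :=
  (PySem.List.le_foldl_max_int _ _ _).2 j (List.mem_range.mpr (by omega))

lemma pvS_attain (xs : List Int) (m : Nat) :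
    pvS xs m = 0 ∨ ∃ j ≤ m, pvS xs m = (j : Int) - (pvFi xs j : Int) := by
  have hrw : pvS xs m
      = List.foldl max 0 ((List.range (m+1)).map (fun (j : Nat) => (j : Int) - (pvFi xs j : Int))) := by
    rw [List.foldl_map]; rfl
  rcases PySem.List.foldl_max_mem ((List.range (m+1)).map (fun (j : Nat) => (j : Int) - (pvFi xs j : Int))) 0 with h | h
  · exact Or.inl (hrw.trans h)
  · obtain ⟨j, hj, hje⟩ := List.mem_map.mp h
    exact Or.inr ⟨j, Nat.lt_succ_iff.mp (List.mem_range.mp hj), hrw.trans hje.symm⟩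

-- ===== A-side: the fold invariant =====
-- A's loop body and loop state, named for the proofs (definitionally the port's lambda)
def pvStepA (st : Int × PySem.Dict Int Int × Int) (p : Int × Int) : Int × PySem.Dict Int Int × Int :=
  match (st.2.1).get? (st.1 + (if p.2 = 1 then 1 else -1)) with
  | some v => (st.1 + (if p.2 = 1 then 1 else -1), st.2.1, max st.2.2 (p.1 - v))
  | none   => (st.1 + (if p.2 = 1 then 1 else -1),
               (st.2.1).insert (st.1 + (if p.2 = 1 then 1 else -1)) p.1, st.2.2)

def pvStA (xs : List Int) : Int × PySem.Dict Int Int × Int :=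
  (PySem.List.enumerate xs).foldl pvStepA (0, (PySem.Dict.empty).insert 0 (-1), 0)

lemma pvFi_zero (xs : List Int) : pvFi xs 0 = 0 := Nat.le_zero.mp (pvFi_le xs 0)

lemma pvFirst_append_iff (xs : List Int) (x v x' : Int)
    (h : v = pvPre (xs ++ [x]) (xs.length + 1) → ∃ k ≤ xs.length, pvPre xs k = v) :
    pvFirst (xs ++ [x]) v x' ↔ pvFirst xs v x' := by
  constructor
  · rintro ⟨k, hk, hpk, hx, hmin⟩
    rcases Nat.lt_or_ge k (xs.length + 1) with hlt | hge
    · have hk' : k ≤ xs.length := by omega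
      refine ⟨k, hk', ?_, hx, fun k' hk'' => ?_⟩
      · rw [← pvPre_append_le xs x hk']; exact hpk
      · rw [← pvPre_append_le xs x (by omega)]; exact hmin k' hk''
    · have hkeq : k = xs.length + 1 := by simp at hk; omega
      subst hkeq
      obtain ⟨k0, hk0, hp0⟩ := h hpk.symm
      have hc : pvPre (xs ++ [x]) k0 = v := by
        rw [pvPre_append_le xs x hk0]; exact hp0
      exact absurd hc (hmin k0 (by omega))
  · rintro ⟨k, hk, hpk, hx, hmin⟩
    refine ⟨k, by simp; omega, ?_, hx, fun k' hk'' => ?_⟩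
    · rw [pvPre_append_le xs x hk]; exact hpk
    · rw [pvPre_append_le xs x (by omega)]; exact hmin k' hk''

lemma A_inv (xs : List Int) :
    (pvStA xs).1 = pvPre xs xs.length ∧
    (∀ v x, ((pvStA xs).2.1.get? v = some x ↔ pvFirst xs v x)) ∧
    (pvStA xs).2.2 = pvS xs xs.length := by
  induction xs using List.reverseRecOn with
  | nil =>
    refine ⟨rfl, fun v x => ?_, ?_⟩
    · show (((PySem.Dict.empty : PySem.Dict Int Int).insert 0 (-1)).get? v = some x) ↔ _
      rw [PySem.Dict.get?_insert]
      constructor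
      · intro h
        split_ifs at h with hv
        · subst hv
          injection h with h
          exact ⟨0, le_refl 0, rfl, by omega, fun k' hk' => absurd hk' (Nat.not_lt_zero k')⟩
        · simp [PySem.Dict.get?_empty] at h
      · rintro ⟨k, hk, hpk, hx, -⟩
        have hk0 : k = 0 := Nat.le_zero.mp hk
        subst hk0
        have hv : v = 0 := by simpa [pvPre] using hpk.symm
        subst hv
        rw [if_pos rfl, hx]
        norm_num
    · show (0 : Int) = pvS [] 0
      simp [pvS, List.range_succ, pvFi_zero]
  | append_singleton xs x ih =>
    obtain ⟨ih1, ih2, ih3⟩ := ih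
    have hst : pvStA (xs ++ [x]) = pvStepA (pvStA xs) ((xs.length : Int), x) := by
      unfold pvStA
      rw [PySem.List.enumerate_append, List.foldl_append]
      simp [PySem.List.enumerate]
    have hps : pvPre (xs ++ [x]) (xs.length + 1) = pvPre xs xs.length + pvf x :=
      pvPre_append_last xs x
    cases hd : (pvStA xs).2.1.get? ((pvStA xs).1 + (if x = 1 then 1 else -1)) with
    | none =>
      have hd' : (pvStA xs).2.1.get? (pvPre xs xs.length + pvf x) = none := by
        rw [ih1] at hd; exact hd
      have hred : pvStepA (pvStA xs) ((xs.length : Int), x)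
          = (pvPre xs xs.length + pvf x,
             (pvStA xs).2.1.insert (pvPre xs xs.length + pvf x) (xs.length : Int),
             (pvStA xs).2.2) := by
        unfold pvStepA
        simp only [hd]
        rw [ih1]
        rfl
      have hno : ∀ k ≤ xs.length, pvPre xs k ≠ pvPre xs xs.length + pvf x := by
        intro k hk hpk
        have hex : ∃ k, pvPre xs k = pvPre xs xs.length + pvf x := ⟨k, hpk⟩
        have hspec := Nat.find_spec hex
        have hle : Nat.find hex ≤ k := Nat.find_min' hex hpk
        have hfirst : pvFirst xs (pvPre xs xs.length + pvf x) ((Nat.find hex : Int) - 1) :=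
          ⟨Nat.find hex, by omega, hspec, rfl, fun k' hk' => Nat.find_min hex hk'⟩
        rw [← ih2] at hfirst
        rw [hd'] at hfirst
        exact absurd hfirst (by simp)
      have hfi : pvFi (xs ++ [x]) (xs.length + 1) = xs.length + 1 := by
        apply pvFi_eq_of
        · rfl
        · intro k hk
          rw [pvPre_append_le xs x (by omega), hps]
          exact hno k (by omega)
      refine ⟨?_, ?_, ?_⟩
      · rw [hst, hred, show (xs ++ [x]).length = xs.length + 1 from by simp]
        exact hps.symm
      · intro v' x'
        rw [hst, hred]
        show ((pvStA xs).2.1.insert (pvPre xs xs.length + pvf x) (xs.length : Int)).get? v' = some x' ↔ _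
        rw [PySem.Dict.get?_insert]
        split_ifs with hv
        · subst hv
          constructor
          · intro h
            injection h with h
            refine ⟨xs.length + 1, le_of_eq (by simp), hps, by omega, fun k' hk' => ?_⟩
            rw [pvPre_append_le xs x (by omega)]
            exact hno k' (by omega)
          · rintro ⟨k, hk, hpk, hx', hmin⟩
            rcases Nat.lt_or_ge k (xs.length + 1) with hlt | hge
            · have hc : pvPre xs k = pvPre xs xs.length + pvf x := by
                rw [← pvPre_append_le xs x (show k ≤ xs.length by omega)]
                exact hpk
              exact absurd hc (hno k (by omega))
            · have hke : k = xs.length + 1 := by simp at hk; omega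
              subst hke
              rw [hx']
              norm_num
        · rw [ih2]
          exact (pvFirst_append_iff xs x v' x' (fun hc => absurd (hc.trans hps) hv)).symm
      · rw [hst, hred, show (xs ++ [x]).length = xs.length + 1 from by simp]
        show (pvStA xs).2.2 = pvS (xs ++ [x]) (xs.length + 1)
        rw [pvS_succ, pvS_append xs x (le_refl xs.length), hfi, ih3]
        have hzero : ((xs.length : Int)) + 1 - ((xs.length + 1 : Nat) : Int) = 0 := by
          push_cast; ring
        rw [hzero, max_eq_left (pvS_nonneg xs xs.length)]
    | some v =>
      have hd' : (pvStA xs).2.1.get? (pvPre xs xs.length + pvf x) = some v := by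
        rw [ih1] at hd; exact hd
      obtain ⟨k, hk, hpk, hv, hmin⟩ := (ih2 _ v).mp hd'
      have hred : pvStepA (pvStA xs) ((xs.length : Int), x)
          = (pvPre xs xs.length + pvf x, (pvStA xs).2.1,
             max (pvStA xs).2.2 ((xs.length : Int) - v)) := by
        unfold pvStepA
        simp only [hd]
        rw [ih1]
        rfl
      have hfi : pvFi (xs ++ [x]) (xs.length + 1) = k := by
        apply pvFi_eq_of
        · rw [pvPre_append_le xs x hk, hps]; exact hpk
        · intro k' hk'
          rw [pvPre_append_le xs x (by omega), hps]
          exact hmin k' hk'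
      refine ⟨?_, ?_, ?_⟩
      · rw [hst, hred, show (xs ++ [x]).length = xs.length + 1 from by simp]
        exact hps.symm
      · intro v' x'
        rw [hst, hred]
        show (pvStA xs).2.1.get? v' = some x' ↔ _
        rw [ih2]
        exact (pvFirst_append_iff xs x v' x'
          (fun hc => ⟨k, hk, by rw [hc, hps]; exact hpk⟩)).symm
      · rw [hst, hred, show (xs ++ [x]).length = xs.length + 1 from by simp]
        show max (pvStA xs).2.2 ((xs.length : Int) - v) = pvS (xs ++ [x]) (xs.length + 1)
        rw [pvS_succ, pvS_append xs x (le_refl xs.length), hfi, ih3, hv]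
        congr 1
        ring

lemma A_eq_S (xs : List Int) : longest_good_subarray xs = pvS xs xs.length := by
  have h : longest_good_subarray xs = (pvStA xs).2.2 := rfl
  rw [h, (A_inv xs).2.2]

-- ===== B-side: port = characterisation =====
-- B's inner-loop body, named for the proofs (definitionally the port's lambda)
def pvStepB (xs : List Int) (i : Int) (st : Int × Int) (j : Int) : Int × Int :=
  (st.1 + (if PySem.List.pyGetD xs j 0 = 1 then 1 else -1),
   if st.1 + (if PySem.List.pyGetD xs j 0 = 1 then 1 else -1) = 0 then max st.2 (j - i + 1)
   else st.2)

lemma B_inner (xs : List Int) (a : Nat) :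
    ∀ (c j : Nat), j + c = xs.length → ∀ ml : Int,
    ((PySem.List.pyRange (j : Int) (xs.length : Int)).foldl (pvStepB xs (a : Int))
      (pvPre xs j - pvPre xs a, ml)).2 = pvInner xs a j xs.length ml := by
  intro c
  induction c with
  | zero =>
    intro j hc ml
    have hj : j = xs.length := by omega
    have hemp : PySem.List.pyRange (j : Int) (xs.length : Int) = [] := by
      simp [PySem.List.pyRange]; omega
    rw [hemp]
    simp [pvInner, hj]
  | succ c ihc =>
    intro j hc ml
    have hjlt : j < xs.length := by omega
    have hget : PySem.List.pyGetD xs (j : Int) 0 = xs[j] := by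
      rw [PySem.List.pyGetD_eq_getElem xs 0 (by positivity) (by exact_mod_cast hjlt)]
      simp
    have hbal : pvPre xs j - pvPre xs a + (if PySem.List.pyGetD xs (j : Int) 0 = 1 then (1:Int) else -1)
        = pvPre xs (j+1) - pvPre xs a := by
      rw [hget, pvPre_succ xs hjlt]
      rw [show (if xs[j] = 1 then (1:Int) else -1) = pvf xs[j] from rfl]
      ring
    rw [PySem.List.pyRange_one_cons (by exact_mod_cast hjlt), List.foldl_cons]
    have hstep : pvStepB xs (a : Int) (pvPre xs j - pvPre xs a, ml) (j : Int)
        = (pvPre xs (j+1) - pvPre xs a,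
           if pvPre xs (j+1) = pvPre xs a then max ml ((j : Int) - (a : Int) + 1) else ml) := by
      unfold pvStepB
      simp only [hbal]
      simp only [sub_eq_zero]
    rw [hstep]
    have hcast : ((j : Int)) + 1 = ((j + 1 : Nat) : Int) := by push_cast; ring
    rw [hcast, ihc (j+1) (by omega)]
    unfold pvInner
    have hrange : List.range' j (xs.length - j) = j :: List.range' (j+1) (xs.length - (j+1)) := by
      rw [show xs.length - j = (xs.length - (j+1)) + 1 by omega, List.range'_succ]
    rw [hrange, List.foldl_cons]

lemma B_eq_pvB (xs : List Int) : longest_good_subarray_alt xs = pvB xs := by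
  have h : longest_good_subarray_alt xs
      = (PySem.List.pyRange 0 (xs.length : Int)).foldl
          (fun max_length i =>
            ((PySem.List.pyRange i (xs.length : Int)).foldl (pvStepB xs i)
              (0, max_length)).2) 0 := rfl
  rw [h, PySem.List.pyRange_zero_natCast xs.length, List.foldl_map]
  unfold pvB
  apply PySem.List.foldl_congr_mem
  intro ml a ha
  have ha' : a < xs.length := List.mem_range.mp ha
  have h0 : ((0 : Int), ml) = (pvPre xs a - pvPre xs a, ml) := by rw [sub_self]
  rw [h0, B_inner xs a (xs.length - a) a (by omega) ml]

-- ===== pvB properties =====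
lemma pvInner_filter (xs : List Int) (a j m : Nat) (ml : Int) :
    pvInner xs a j m ml =
      ((List.range' j (m - j)).filter
          (fun k => decide (pvPre xs (k+1) = pvPre xs a))).foldl
        (fun (acc : Int) (k : Nat) => max acc ((k : Int) - (a : Int) + 1)) ml := by
  unfold pvInner
  exact PySem.List.foldl_ite_eq_foldl_filter _ _ _ _

lemma pvInner_mono (xs : List Int) (a j m : Nat) (ml : Int) : ml ≤ pvInner xs a j m ml := by
  rw [pvInner_filter]; exact (PySem.List.le_foldl_max_int _ _ _).1

lemma pvInner_bound (xs : List Int) {a j m k : Nat} (hk : k ∈ List.range' j (m - j))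
    (hp : pvPre xs (k+1) = pvPre xs a) (ml : Int) :
    (k : Int) - (a : Int) + 1 ≤ pvInner xs a j m ml := by
  rw [pvInner_filter]
  exact (PySem.List.le_foldl_max_int _ _ _).2 k (List.mem_filter.mpr ⟨hk, by simp [hp]⟩)

lemma pvInner_attain (xs : List Int) (a j m : Nat) (ml : Int) :
    pvInner xs a j m ml = ml ∨
    ∃ k, k ∈ List.range' j (m - j) ∧ pvPre xs (k+1) = pvPre xs a ∧
      pvInner xs a j m ml = (k : Int) - (a : Int) + 1 := by
  rw [pvInner_filter]
  rw [show ((List.range' j (m - j)).filter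
        (fun k => decide (pvPre xs (k+1) = pvPre xs a))).foldl
      (fun (acc : Int) (k : Nat) => max acc ((k : Int) - (a : Int) + 1)) ml
    = List.foldl max ml (((List.range' j (m - j)).filter
        (fun k => decide (pvPre xs (k+1) = pvPre xs a))).map
      (fun (k : Nat) => (k : Int) - (a : Int) + 1)) from (List.foldl_map).symm]
  rcases PySem.List.foldl_max_mem (((List.range' j (m - j)).filter
      (fun k => decide (pvPre xs (k+1) = pvPre xs a))).map
    (fun (k : Nat) => (k : Int) - (a : Int) + 1)) ml with h | h
  · exact Or.inl h
  · obtain ⟨k, hk, hke⟩ := List.mem_map.mp h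
    have hk' := List.mem_filter.mp hk
    exact Or.inr ⟨k, hk'.1, by simpa using hk'.2, hke.symm⟩

-- generic: a fold whose every step can only increase the accumulator
lemma foldl_mono_init (step : Int → Nat → Int) (hmono : ∀ ml x, ml ≤ step ml x) :
    ∀ (l : List Nat) (ml : Int), ml ≤ l.foldl step ml := by
  intro l
  induction l with
  | nil => intro ml; exact le_refl ml
  | cons y t ih => intro ml; exact le_trans (hmono ml y) (ih (step ml y))

-- generic: a lower bound provided by one visited element survives to the end
lemma foldl_le_of_mem (step : Int → Nat → Int) (hmono : ∀ ml x, ml ≤ step ml x)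
    {x : Nat} {l : List Nat} (hx : x ∈ l) (v : Int) (hv : ∀ ml, v ≤ step ml x) :
    ∀ ml, v ≤ l.foldl step ml := by
  induction l with
  | nil => exact absurd hx (List.not_mem_nil)
  | cons y t ih =>
    intro ml
    rcases List.mem_cons.mp hx with h | h
    · subst h
      exact le_trans (hv ml) (foldl_mono_init step hmono t (step ml x))
    · exact ih h (step ml y)

-- generic: the fold returns its initial value or a value of the step's shape
lemma foldl_eq_or (step : Int → Nat → Int) (P : Int → Prop)
    (h : ∀ ml x, step ml x = ml ∨ P (step ml x)) :
    ∀ (l : List Nat) (ml : Int), l.foldl step ml = ml ∨ P (l.foldl step ml) := by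
  intro l
  induction l with
  | nil => intro ml; exact Or.inl rfl
  | cons y t ih =>
    intro ml
    rcases ih (step ml y) with h1 | h1
    · rw [List.foldl_cons, h1]
      rcases h ml y with h2 | h2
      · exact Or.inl h2
      · exact Or.inr h2
    · exact Or.inr h1

lemma pvB_nonneg (xs : List Int) : 0 ≤ pvB xs :=
  foldl_mono_init _ (fun ml a => pvInner_mono xs a a xs.length ml) _ 0

lemma pvB_bound (xs : List Int) {a b : Nat} (hab : a < b) (hb : b ≤ xs.length)
    (hp : pvPre xs a = pvPre xs b) : (b : Int) - (a : Int) ≤ pvB xs := by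
  unfold pvB
  have hv : ∀ ml : Int, (b : Int) - (a : Int) ≤ pvInner xs a a xs.length ml := by
    intro ml
    have hk : b - 1 ∈ List.range' a (xs.length - a) :=
      List.mem_range'_1.mpr (by omega)
    have hb1 : b - 1 + 1 = b := by omega
    have h2 := pvInner_bound xs (a := a) (j := a) (m := xs.length) hk
      (by rw [hb1]; exact hp.symm) ml
    have hcast : ((b - 1 : Nat) : Int) = (b : Int) - 1 := by omega
    rw [hcast] at h2
    linarith
  exact foldl_le_of_mem (fun ml x => pvInner xs x x xs.length ml)
    (fun ml x => pvInner_mono xs x x xs.length ml)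
    (x := a) (List.mem_range.mpr (by omega)) _ hv 0

lemma pvB_attain (xs : List Int) :
    pvB xs = 0 ∨ ∃ a b : Nat, a < b ∧ b ≤ xs.length ∧ pvPre xs a = pvPre xs b ∧
      pvB xs = (b : Int) - (a : Int) := by
  unfold pvB
  refine foldl_eq_or (fun ml x => pvInner xs x x xs.length ml)
    (fun v => ∃ a b : Nat, a < b ∧ b ≤ xs.length ∧ pvPre xs a = pvPre xs b ∧
      v = (b : Int) - (a : Int)) (fun ml x => ?_) (List.range xs.length) 0
  rcases pvInner_attain xs x x xs.length ml with h | h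
  · exact Or.inl h
  · obtain ⟨k, hk, hp, he⟩ := h
    have hk' := List.mem_range'_1.mp hk
    refine Or.inr ⟨x, k + 1, by omega, by omega, hp.symm, ?_⟩
    show pvInner xs x x xs.length ml = ((k + 1 : Nat) : Int) - (x : Int)
    rw [he]; push_cast; ring

-- ===== bridge =====
lemma S_eq_pvB (xs : List Int) : pvS xs xs.length = pvB xs := by
  apply le_antisymm
  · rcases pvS_attain xs xs.length with h | ⟨j, hj, he⟩
    · rw [h]; exact pvB_nonneg xs
    · rcases Nat.lt_or_ge (pvFi xs j) j with hlt | hge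
      · rw [he]
        exact pvB_bound xs hlt hj (pvFi_spec xs j)
      · have : pvFi xs j = j := le_antisymm (pvFi_le xs j) hge
        rw [he, this, sub_self]
        exact pvB_nonneg xs
  · rcases pvB_attain xs with h | ⟨a, b, hab, hb, hp, he⟩
    · rw [h]; exact pvS_nonneg xs xs.length
    · have hfa : pvFi xs b ≤ a := by
        unfold pvFi; exact Nat.find_min' _ hp
      have h1 : (b : Int) - (a : Int) ≤ (b : Int) - (pvFi xs b : Int) := by
        have : ((pvFi xs b : Nat) : Int) ≤ (a : Int) := by exact_mod_cast hfa
        linarith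
      rw [he]
      exact le_trans h1 (pvS_bound xs hb)

-- ===== VERDICT (by name: the statement is the Claim_ definition above) =====
theorem longest_good_subarray_spec : Claim_equal_longest_good_subarray := by
  intro nums _
  unfold Spec_longest_good_subarray
  rw [A_eq_S, S_eq_pvB, ← B_eq_pvB]
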